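-- pv_equiv track=rewrite | github.com/zwt121/zwt_code1 | 下载/python/Flask/练习/33多米诺骨牌骨头上的点.py | dots_on_domino_bones
-- ===== SOURCE A (Python) =====
-- def dots_on_domino_bones(n):
--
--     num_add=0
--     if n >=0:
--         for n in range(0,n+1):
--             num_add=num_add+n
--         return num_add*(n+2)
--     else:
--         return -1
-- ===== SOURCE B (Python) =====
-- def dots_on_domino_bones(n):
--     # closed form: triangular number times (n+2); O(1) instead of A's O(n) loop
--     if n >= 0:
--         return n * (n + 1) // 2 * (n + 2)
--     else:
--         return -1
-- ===== Notes on version B (the rewrite author's own statement) =====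
-- stated objective: faster
-- what changed: Replaces A's summation loop over range(0,n+1) by the closed-form triangular number n*(n+1)//2 multiplied by (n+2).
import Mathlib
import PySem

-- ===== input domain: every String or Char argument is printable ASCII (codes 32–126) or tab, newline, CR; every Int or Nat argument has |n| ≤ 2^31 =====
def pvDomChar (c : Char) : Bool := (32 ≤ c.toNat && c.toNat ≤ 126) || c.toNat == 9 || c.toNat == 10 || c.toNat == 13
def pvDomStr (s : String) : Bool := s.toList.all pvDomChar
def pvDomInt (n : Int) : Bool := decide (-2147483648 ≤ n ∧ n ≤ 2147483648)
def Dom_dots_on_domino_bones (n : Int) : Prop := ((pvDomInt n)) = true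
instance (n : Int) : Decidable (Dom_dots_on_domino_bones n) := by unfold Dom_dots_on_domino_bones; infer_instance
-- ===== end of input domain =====

-- B replaces A's summation loop by the closed-form triangular number (O(1) vs O(n)).

-- ===== PORT A =====
-- the loop variable shadows the parameter n; the state is (num_add, loop variable)
def dots_on_domino_bones (n : Int) : Int :=
  let num_add : Int := 0
  if n ≥ 0 then
    let st := (PySem.List.pyRange 0 (n + 1) 1).foldl (fun (s : Int × Int) k => (s.1 + k, k)) (num_add, n)
    st.1 * (st.2 + 2)
  else
    -1

-- ===== PORT B =====
def dots_on_domino_bones_alt (n : Int) : Int :=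
  if n ≥ 0 then
    PySem.Int.floordiv (n * (n + 1)) 2 * (n + 2)
  else
    -1

-- ===== PRECONDITION & SPEC =====
def Spec_dots_on_domino_bones (n : Int) (out : Int) : Prop := out = dots_on_domino_bones_alt n
instance (n : Int) (out : Int) : Decidable (Spec_dots_on_domino_bones n out) := by unfold Spec_dots_on_domino_bones; infer_instance

-- ===== CLAIM (what is proved, stated in full; the proofs are below) =====
def Claim_equal_dots_on_domino_bones : Prop := ∀ (n : Int), Dom_dots_on_domino_bones n → Spec_dots_on_domino_bones n (dots_on_domino_bones n)

-- ===== LEMMAS AND PROOFS =====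

-- the fold over range 0..m-1 accumulates the triangular number and records the last element
theorem pv_fold_range (m : Nat) (a c : Int) :
    ((List.range m).map (fun k : Nat => (0 : Int) + (k : Int))).foldl (fun (s : Int × Int) k => (s.1 + k, k)) (a, c)
      = (a + ((m * (m - 1)) / 2 : Nat), if m = 0 then c else ((m : Int) - 1)) := by
  induction m generalizing a c with
  | zero => simp
  | succ m ih =>
      rw [List.range_succ, List.map_append, List.foldl_append, ih]
      simp only [List.map_cons, List.map_nil, List.foldl_cons, List.foldl_nil]
      rw [Prod.mk.injEq]
      refine ⟨?_, by simp⟩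
      have e : (m + 1) * (m + 1 - 1) = m * (m - 1) + 2 * m := by
        cases m with
        | zero => rfl
        | succ k => simp; ring
      have h2 : (m + 1) * (m + 1 - 1) / 2 = m * (m - 1) / 2 + m := by omega
      rw [h2]
      push_cast
      ring

theorem pv_eq (n : Int) : dots_on_domino_bones n = dots_on_domino_bones_alt n := by
  unfold dots_on_domino_bones dots_on_domino_bones_alt
  by_cases h : n ≥ 0
  · simp only [h, if_pos]
    obtain ⟨m, rfl⟩ := Int.eq_ofNat_of_zero_le h
    rw [PySem.List.pyRange_one]
    have hlen : ((m : Int) + 1 - 0).toNat = m + 1 := by omega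
    rw [hlen, pv_fold_range]
    simp only [Nat.add_sub_cancel, Nat.succ_ne_zero, if_neg, not_false_iff]
    have hfd : PySem.Int.floordiv ((m : Int) * ((m : Int) + 1)) 2 = (((m + 1) * m / 2 : Nat) : Int) := by
      have hc : (m : Int) * ((m : Int) + 1) = (((m + 1) * m : Nat) : Int) := by push_cast; ring
      rw [PySem.Int.floordiv, hc]
      simp [Int.fdiv_eq_ediv]
    rw [hfd, zero_add]
    push_cast
    ring
  · simp [h]

-- ===== VERDICT (by name: the statement is the Claim_ definition above) =====
theorem dots_on_domino_bones_spec : Claim_equal_dots_on_domino_bones := by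
  intro n _
  exact pv_eq n
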